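-- pv_equiv track=rewrite | github.com/superhac/vpinfe | common/score_parser.py | digit_bytes_to_int
-- ===== SOURCE A (Python) =====
-- def digit_bytes_to_int(
--     byte_vals: list[int],
--     digit_offset: int = 0,
--     zero_byte: int | None = None,
-- ) -> int:
--     """Convert a sequence of digit bytes into an integer."""
--     value = 0
--
--     for byte_val in byte_vals:
--         if zero_byte is not None and byte_val == zero_byte:
--             digit = 0
--         else:
--             digit = byte_val - digit_offset
--         if digit < 0 or digit > 9:
--             raise ValueError(f"Invalid digit byte: {byte_val} with offset {digit_offset}")
--         value = value * 10 + digit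
--
--     return value
-- ===== SOURCE B (Python) =====
-- def digit_bytes_to_int(
--     byte_vals: list[int],
--     digit_offset: int = 0,
--     zero_byte: int | None = None,
-- ) -> int:
--     """Convert a sequence of digit bytes into an integer."""
--     digits = [0 if b == zero_byte else b - digit_offset for b in byte_vals]
--     for b, d in zip(byte_vals, digits):
--         if not 0 <= d <= 9:
--             raise ValueError(f"Invalid digit byte: {b} with offset {digit_offset}")
--     n = len(digits)
--     return sum(d * 10 ** (n - 1 - i) for i, d in enumerate(digits))
-- ===== Notes on version B (the rewrite author's own statement) =====
-- stated objective: alternative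
-- what changed: Replaces A's single Horner-style accumulation (value = value*10 + digit inside the validation loop) by a digit comprehension, a separate zip validation pass raising the same ValueError at the first invalid byte, and an explicit positional sum d * 10**(n-1-i) over enumerate(digits).
import Mathlib
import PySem

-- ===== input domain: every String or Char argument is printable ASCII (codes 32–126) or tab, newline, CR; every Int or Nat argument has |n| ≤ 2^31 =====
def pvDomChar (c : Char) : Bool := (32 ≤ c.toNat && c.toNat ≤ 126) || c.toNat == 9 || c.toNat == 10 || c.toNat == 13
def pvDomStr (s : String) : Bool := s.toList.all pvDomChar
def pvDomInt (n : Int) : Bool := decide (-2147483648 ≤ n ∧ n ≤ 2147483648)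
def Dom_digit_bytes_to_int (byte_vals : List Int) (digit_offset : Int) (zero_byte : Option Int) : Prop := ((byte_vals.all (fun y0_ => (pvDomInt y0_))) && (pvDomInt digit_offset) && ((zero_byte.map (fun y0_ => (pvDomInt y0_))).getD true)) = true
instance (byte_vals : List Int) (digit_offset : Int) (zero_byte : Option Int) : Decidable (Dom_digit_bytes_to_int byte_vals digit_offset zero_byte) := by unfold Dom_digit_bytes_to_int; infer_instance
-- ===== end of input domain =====

-- B replaces A's Horner accumulation by a validate-then-collect pass followed by an
-- explicit positional sum Σ d_i * 10^(n-1-i); objective: alternative decomposition, same cost.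
-- A raises ValueError on an out-of-range digit; exactly those inputs are excluded by Pre_.

-- ===== PORT A =====
-- the loop of A: value accumulator, Horner step; the `raise ValueError` branch is
-- unreachable under Pre_ (the port returns the current value there)
def pvLoopA (digit_offset : Int) (zero_byte : Option Int) : Int → List Int → Int
  | value, [] => value
  | value, byte_val :: rest =>
    let digit : Int := if zero_byte = some byte_val then 0 else byte_val - digit_offset
    if digit < 0 ∨ digit > 9 then value
    else pvLoopA digit_offset zero_byte (value * 10 + digit) rest

def digit_bytes_to_int (byte_vals : List Int) (digit_offset : Int) (zero_byte : Option Int) : Int :=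
  pvLoopA digit_offset zero_byte 0 byte_vals

-- ===== PORT B =====
-- B: digit comprehension ('b == zero_byte' is exactly 'zero_byte = some b' since the
-- elements are ints and None compares unequal to every int), then the zip validation loop
-- — which only raises (excluded by Pre_) and computes nothing, so it contributes no code
-- here — then the positional sum over enumerate(digits).
def digit_bytes_to_int_alt (byte_vals : List Int) (digit_offset : Int) (zero_byte : Option Int) : Int :=
  let digits := byte_vals.map (fun b => if zero_byte = some b then 0 else b - digit_offset)
  let n : Int := digits.length
  (PySem.List.enumerate digits 0).foldl
    (fun acc p => acc + p.2 * 10 ^ ((n - 1 - p.1).toNat)) 0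

-- ===== PRECONDITION & SPEC =====
-- helper used only by Pre_ and the proofs: the digit Python computes for a byte
def pvDigit (digit_offset : Int) (zero_byte : Option Int) (b : Int) : Int :=
  if zero_byte = some b then 0 else b - digit_offset

-- Pre_ excludes exactly the inputs where A raises ValueError (some digit outside 0..9)
def Pre_digit_bytes_to_int (byte_vals : List Int) (digit_offset : Int) (zero_byte : Option Int) : Prop :=
  ∀ b ∈ byte_vals, 0 ≤ pvDigit digit_offset zero_byte b ∧ pvDigit digit_offset zero_byte b ≤ 9
instance (byte_vals : List Int) (digit_offset : Int) (zero_byte : Option Int) : Decidable (Pre_digit_bytes_to_int byte_vals digit_offset zero_byte) := by unfold Pre_digit_bytes_to_int; infer_instance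

def pvWitness_digit_bytes_to_int : List Int × Int × Option Int := ([49, 50, 48], 48, some 45)

def Spec_digit_bytes_to_int (byte_vals : List Int) (digit_offset : Int) (zero_byte : Option Int) (out : Int) : Prop := out = digit_bytes_to_int_alt byte_vals digit_offset zero_byte
instance (byte_vals : List Int) (digit_offset : Int) (zero_byte : Option Int) (out : Int) : Decidable (Spec_digit_bytes_to_int byte_vals digit_offset zero_byte out) := by unfold Spec_digit_bytes_to_int; infer_instance

-- ===== CLAIM (what is proved, stated in full; the proofs are below) =====
def Claim_equal_digit_bytes_to_int : Prop := ∀ (byte_vals : List Int) (digit_offset : Int) (zero_byte : Option Int), Dom_digit_bytes_to_int byte_vals digit_offset zero_byte → Pre_digit_bytes_to_int byte_vals digit_offset zero_byte → Spec_digit_bytes_to_int byte_vals digit_offset zero_byte (digit_bytes_to_int byte_vals digit_offset zero_byte)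

-- ===== LEMMAS AND PROOFS =====

-- B's digit comprehension is the map of pvDigit
theorem mapB_eq_map (digit_offset : Int) (zero_byte : Option Int) (l : List Int) :
    l.map (fun b => if zero_byte = some b then 0 else b - digit_offset)
      = l.map (pvDigit digit_offset zero_byte) := rfl

-- Horner shift: starting value factors out as v * 10^len
theorem horner_shift : ∀ (ds : List Int) (v : Int),
    ds.foldl (fun a d => a * 10 + d) v
      = v * 10 ^ ds.length + ds.foldl (fun a d => a * 10 + d) 0 := by
  intro ds
  induction ds with
  | nil => intro v; simp
  | cons d rest ih =>
    intro v
    simp only [List.foldl_cons, List.length_cons]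
    rw [ih (v * 10 + d), ih (0 * 10 + d)]
    ring

-- B's positional fold equals Horner evaluation of the digit list
theorem bfold_eq_horner : ∀ (ds : List Int) (s acc n : Int), n - s = (ds.length : Int) →
    (PySem.List.enumerate ds s).foldl
        (fun a p => a + p.2 * 10 ^ ((n - 1 - p.1).toNat)) acc
      = acc + ds.foldl (fun a d => a * 10 + d) 0 := by
  intro ds
  induction ds with
  | nil => intro s acc n _; simp [PySem.List.enumerate_nil]
  | cons d rest ih =>
    intro s acc n hn
    rw [PySem.List.enumerate_cons]
    simp only [List.foldl_cons]
    rw [ih (s + 1) _ n (by simp at hn ⊢; omega)]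
    have hexp : (n - 1 - s).toNat = rest.length := by
      simp at hn; omega
    rw [hexp, horner_shift rest (0 * 10 + d)]
    ring

-- A's Horner loop over valid bytes equals the Horner fold of the mapped digits
theorem loopA_eq_horner (digit_offset : Int) (zero_byte : Option Int) :
    ∀ (l : List Int) (v : Int),
      (∀ b ∈ l, 0 ≤ pvDigit digit_offset zero_byte b ∧ pvDigit digit_offset zero_byte b ≤ 9) →
      pvLoopA digit_offset zero_byte v l
        = (l.map (pvDigit digit_offset zero_byte)).foldl (fun a d => a * 10 + d) v := by
  intro l
  induction l with
  | nil => intro v _; rfl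
  | cons b rest ih =>
    intro v h
    have hb := h b (by simp)
    have hrest : ∀ x ∈ rest, 0 ≤ pvDigit digit_offset zero_byte x ∧ pvDigit digit_offset zero_byte x ≤ 9 :=
      fun x hx => h x (by simp [hx])
    simp only [pvLoopA, List.map_cons, List.foldl_cons]
    rw [if_neg (by simp only [pvDigit] at hb; omega)]
    have hd : (if zero_byte = some b then 0 else b - digit_offset) = pvDigit digit_offset zero_byte b := rfl
    rw [hd, ih _ hrest]

-- ===== VERDICT (by name: the statement is the Claim_ definition above) =====
theorem digit_bytes_to_int_spec : Claim_equal_digit_bytes_to_int := by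
  intro byte_vals digit_offset zero_byte _ hpre
  show _ = _
  unfold digit_bytes_to_int digit_bytes_to_int_alt
  rw [loopA_eq_horner digit_offset zero_byte byte_vals 0 hpre,
      mapB_eq_map,
      bfold_eq_horner _ 0 0 _ (by simp)]
  simp
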